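-- pv_equiv track=rewrite | github.com/john-chang-8484/frequency-inference | main_exp_data.py | break_out_times
-- ===== SOURCE A (Python) =====
-- def break_out_times(exp_ts, whichts):
--     """ group together measurements with the same t """
--     t_groups, i_groups = [], []
--     for t, i in zip(exp_ts, whichts):
--         if len(t_groups) > 0 and t_groups[-1] == t:
--             i_groups[-1].append(i)
--         else:
--             t_groups.append(t)
--             i_groups.append([i])
--     return t_groups, i_groups
-- ===== SOURCE B (Python) =====
-- def break_out_times(exp_ts, whichts):
--     """ group together measurements with the same t """
--     pairs = list(zip(exp_ts, whichts))
--     t_groups, i_groups = [], []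
--     k = 0
--     while k < len(pairs):
--         t = pairs[k][0]
--         j = k + 1
--         while j < len(pairs) and pairs[j][0] == t:
--             j += 1
--         t_groups.append(t)
--         i_groups.append([p[1] for p in pairs[k:j]])
--         k = j
--     return t_groups, i_groups
-- ===== Notes on version B (the rewrite author's own statement) =====
-- stated objective: alternative
-- what changed: Replaces the element-by-element fold that tracks and mutates the last group (t_groups[-1] test, i_groups[-1].append) with run extraction: an outer loop that scans forward to find each maximal run of equal t and emits the whole group at once.
import Mathlib
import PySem

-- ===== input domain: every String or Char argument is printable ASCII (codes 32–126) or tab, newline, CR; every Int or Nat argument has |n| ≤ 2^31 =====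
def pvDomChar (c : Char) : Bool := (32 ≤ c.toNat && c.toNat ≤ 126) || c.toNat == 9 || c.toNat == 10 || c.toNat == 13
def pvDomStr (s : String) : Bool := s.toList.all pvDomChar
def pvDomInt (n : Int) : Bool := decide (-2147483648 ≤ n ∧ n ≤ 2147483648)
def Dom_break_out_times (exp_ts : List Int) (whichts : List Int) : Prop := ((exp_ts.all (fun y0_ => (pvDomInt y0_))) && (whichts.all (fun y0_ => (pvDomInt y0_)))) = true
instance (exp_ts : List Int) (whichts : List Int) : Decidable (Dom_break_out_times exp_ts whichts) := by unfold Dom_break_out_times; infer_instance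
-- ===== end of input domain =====

-- B replaces A's element-by-element fold mutating the last group with run extraction
-- (scan forward over each maximal run of equal t and emit the whole group at once);
-- objective: alternative decomposition, same cost. Return-value equivalence only.


-- ===== PORT A =====
-- i_groups[-1].append(i): replace the last group by itself with i appended
def pvStepA (st : List Int × List (List Int)) (p : Int × Int) : List Int × List (List Int) :=
  if st.1 ≠ [] ∧ st.1.getLast? = some p.1 then
    (st.1, st.2.dropLast ++ [(st.2.getLast?.getD []) ++ [p.2]])
  else
    (st.1 ++ [p.1], st.2 ++ [[p.2]])

def break_out_times (exp_ts : List Int) (whichts : List Int) : List Int × List (List Int) :=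
  (exp_ts.zip whichts).foldl pvStepA ([], [])

-- ===== PORT B =====
-- run extraction: peel the maximal run with the same t, emit it as one group, recurse
def pvRuns : List (Int × Int) → List Int × List (List Int)
  | [] => ([], [])
  | (t, i) :: rest =>
    let run := rest.takeWhile (fun p => p.1 == t)
    let rest' := rest.dropWhile (fun p => p.1 == t)
    let r := pvRuns rest'
    (t :: r.1, (i :: run.map (·.2)) :: r.2)
termination_by l => l.length
decreasing_by
  have := List.length_dropWhile_le (p := fun p : Int × Int => p.1 == t) (l := rest)
  simp only [List.length_cons]; omega

def break_out_times_alt (exp_ts : List Int) (whichts : List Int) : List Int × List (List Int) :=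
  pvRuns (exp_ts.zip whichts)

-- ===== PRECONDITION & SPEC =====
def Spec_break_out_times (exp_ts : List Int) (whichts : List Int) (out : List Int × List (List Int)) : Prop := out = break_out_times_alt exp_ts whichts
instance (exp_ts : List Int) (whichts : List Int) (out : List Int × List (List Int)) : Decidable (Spec_break_out_times exp_ts whichts out) := by unfold Spec_break_out_times; infer_instance

-- ===== CLAIM (what is proved, stated in full; the proofs are below) =====
def Claim_equal_break_out_times : Prop := ∀ (exp_ts : List Int) (whichts : List Int), Dom_break_out_times exp_ts whichts → Spec_break_out_times exp_ts whichts (break_out_times exp_ts whichts)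

-- ===== LEMMAS AND PROOFS =====

theorem pvRuns_nil : pvRuns [] = ([], []) := by unfold pvRuns; rfl

theorem pvRuns_cons (t i : Int) (rest : List (Int × Int)) : pvRuns ((t, i) :: rest) =
    (t :: (pvRuns (rest.dropWhile (fun p => p.1 == t))).1,
     (i :: (rest.takeWhile (fun p => p.1 == t)).map (·.2)) ::
       (pvRuns (rest.dropWhile (fun p => p.1 == t))).2) := by
  rw [pvRuns.eq_def]

-- proof-only helper: A's fold after its first element, with current key t and current group g
def pvGoAux (t : Int) (g : List Int) : List (Int × Int) → List Int × List (List Int)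
  | [] => ([t], [g])
  | (t', i) :: rest =>
    if t' = t then pvGoAux t (g ++ [i]) rest
    else
      let r := pvGoAux t' [i] rest
      (t :: r.1, g :: r.2)

theorem pvFoldA_eq (l : List (Int × Int)) : ∀ (t : Int) (g : List Int)
    (tg : List Int) (ig : List (List Int)),
    l.foldl pvStepA (tg ++ [t], ig ++ [g]) =
      (tg ++ (pvGoAux t g l).1, ig ++ (pvGoAux t g l).2) := by
  induction l with
  | nil => intro t g tg ig; simp [pvGoAux]
  | cons p rest ih =>
    intro t g tg ig
    obtain ⟨t', i⟩ := p
    simp only [List.foldl_cons]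
    by_cases h : t' = t
    · subst h
      rw [show pvStepA (tg ++ [t'], ig ++ [g]) (t', i) = (tg ++ [t'], ig ++ [g ++ [i]]) from by
        simp [pvStepA]]
      rw [ih t' (g ++ [i]) tg ig]
      simp [pvGoAux]
    · rw [show pvStepA (tg ++ [t], ig ++ [g]) (t', i)
          = ((tg ++ [t]) ++ [t'], (ig ++ [g]) ++ [[i]]) from by
        simp [pvStepA]; exact fun heq => h heq.symm]
      rw [ih t' [i] (tg ++ [t]) (ig ++ [g])]
      simp [pvGoAux, h]

theorem pvGoAux_eq_runs (n : ℕ) : ∀ (l : List (Int × Int)), l.length ≤ n → ∀ (t : Int) (g : List Int),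
    pvGoAux t g l =
      (t :: (pvRuns (l.dropWhile (fun p => p.1 == t))).1,
       (g ++ (l.takeWhile (fun p => p.1 == t)).map (·.2)) :: (pvRuns (l.dropWhile (fun p => p.1 == t))).2) := by
  induction n with
  | zero =>
    intro l hl t g
    have : l = [] := List.eq_nil_of_length_eq_zero (Nat.le_zero.mp hl)
    subst this; simp [pvGoAux, pvRuns_nil]
  | succ n ih =>
    intro l hl t g
    cases l with
    | nil => simp [pvGoAux, pvRuns_nil]
    | cons p rest =>
      obtain ⟨t', i⟩ := p
      by_cases h : t' = t
      · subst h
        simp only [pvGoAux, List.takeWhile_cons, List.dropWhile_cons, beq_self_eq_true,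
          if_true]
        rw [ih rest (Nat.lt_succ_iff.mp (by simpa using hl)) t' (g ++ [i])]
        simp
      · have hne : (t' == t) = false := by simp [h]
        simp only [pvGoAux, if_neg h, List.takeWhile_cons, List.dropWhile_cons, hne]
        simp only [Bool.false_eq_true, if_false, List.map_nil, List.append_nil]
        rw [ih rest (Nat.lt_succ_iff.mp (by simpa using hl)) t' [i]]
        rw [pvRuns_cons]
        simp

-- ===== VERDICT (by name: the statement is the Claim_ definition above) =====
theorem break_out_times_spec : Claim_equal_break_out_times := by
  intro exp_ts whichts _
  unfold Spec_break_out_times break_out_times break_out_times_alt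
  cases hz : exp_ts.zip whichts with
  | nil => simp [pvRuns_nil]
  | cons p rest =>
    obtain ⟨t, i⟩ := p
    have h1 : ((t, i) :: rest).foldl pvStepA ([], []) = rest.foldl pvStepA ([t], [[i]]) := by
      simp [pvStepA]
    rw [h1]
    have := pvFoldA_eq rest t [i] [] []
    simp only [List.nil_append] at this
    rw [this, pvGoAux_eq_runs rest.length rest le_rfl t [i], pvRuns_cons]
    simp
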